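-- pv_equiv track=rewrite | github.com/erp12/pyshgp | problems/string.py | string_char_counts_difference
-- ===== SOURCE A (Python) =====
-- import collections
--
-- def string_char_counts_difference(s1, s2):
-- 	'''
-- 	'''
-- 	result = len(s1) + len(s2)
-- 	s1_letters = collections.Counter(s1)
-- 	for c in s2:
-- 		if c in s1_letters:
-- 			result -= 2
-- 			s1_letters[c] -= 1
-- 			if s1_letters[c] == 0:
-- 				s1_letters.pop(c, None)
-- 	return result
-- ===== SOURCE B (Python) =====
-- import collections
--
-- def string_char_counts_difference(s1, s2):
--     c1 = collections.Counter(s1)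
--     c2 = collections.Counter(s2)
--     return sum(abs(c1[ch] - c2[ch]) for ch in (c1 | c2))
-- ===== Notes on version B (the rewrite author's own statement) =====
-- stated objective: simpler
-- what changed: Replaces A's decrementing single pass over s2 (conditional decrement/pop of a live counter) by building both character counters up front and summing absolute count differences over the union of their keys; the branch-free C-level Counter arithmetic is also a measured constant-factor speedup.
import Mathlib
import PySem

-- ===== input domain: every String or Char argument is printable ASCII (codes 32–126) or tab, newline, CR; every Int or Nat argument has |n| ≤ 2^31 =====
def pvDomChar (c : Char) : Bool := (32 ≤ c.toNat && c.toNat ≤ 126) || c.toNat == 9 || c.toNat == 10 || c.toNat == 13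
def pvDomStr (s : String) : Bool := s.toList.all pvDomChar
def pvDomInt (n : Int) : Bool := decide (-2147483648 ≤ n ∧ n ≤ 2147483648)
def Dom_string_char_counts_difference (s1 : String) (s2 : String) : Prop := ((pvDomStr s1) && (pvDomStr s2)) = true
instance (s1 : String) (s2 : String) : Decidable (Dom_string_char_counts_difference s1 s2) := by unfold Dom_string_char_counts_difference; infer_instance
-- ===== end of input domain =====

-- B builds both character counters and sums the absolute count differences over the union of
-- their keys, instead of A's decrementing single pass over s2; objective: simpler (and measured faster by a constant factor).

-- ===== PORT A =====
def string_char_counts_difference (s1 : String) (s2 : String) : Int :=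
  -- result = len(s1) + len(s2); s1_letters = Counter(s1); then the loop over s2
  let result : Int := PySem.Str.len s1 + PySem.Str.len s2
  let s1_letters : PySem.Dict Char Int := PySem.Dict.counter s1.toList
  let fin := s2.toList.foldl (fun (st : Int × PySem.Dict Char Int) c =>
    if st.2.contains c then
      let r := st.1 - 2
      let d := st.2.modify c 0 (fun v => v - 1)      -- s1_letters[c] -= 1
      if d.getD c 0 = 0 then (r, d.erase c) else (r, d)  -- pop at zero
    else st) (result, s1_letters)
  fin.1

-- ===== PORT B =====
def string_char_counts_difference_alt (s1 : String) (s2 : String) : Int :=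
  let c1 : PySem.Dict Char Int := PySem.Dict.counter s1.toList
  let c2 : PySem.Dict Char Int := PySem.Dict.counter s2.toList
  -- keys of the Counter union c1 | c2 (all counts are positive): c1's keys then c2's new keys
  let keys : PySem.Set Char := PySem.Set.union c1.keys c2.keys
  (keys.map (fun ch => |c1.getD ch 0 - c2.getD ch 0|)).sum

-- ===== PRECONDITION & SPEC =====
def Spec_string_char_counts_difference (s1 : String) (s2 : String) (out : Int) : Prop := out = string_char_counts_difference_alt s1 s2
instance (s1 : String) (s2 : String) (out : Int) : Decidable (Spec_string_char_counts_difference s1 s2 out) := by unfold Spec_string_char_counts_difference; infer_instance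

-- ===== CLAIM (what is proved, stated in full; the proofs are below) =====
def Claim_equal_string_char_counts_difference : Prop := ∀ (s1 : String) (s2 : String), Dom_string_char_counts_difference s1 s2 → Spec_string_char_counts_difference s1 s2 (string_char_counts_difference s1 s2)

-- ===== LEMMAS AND PROOFS =====

-- number of characters of the second list matched (and consumed) against the multiset of the first
def pvMatched : List Char → List Char → Nat
  | _, [] => 0
  | m, c :: t => if c ∈ m then pvMatched (m.erase c) t + 1 else pvMatched m t

-- the dict in A's loop represents the multiset m of still-unmatched s1 characters
def pvRep (d : PySem.Dict Char Int) (m : List Char) : Prop :=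
  ∀ c : Char, d.get? c = if m.count c = 0 then none else some (m.count c : Int)

theorem pvFindFilter (k k' : Char) (h : k' ≠ k) : ∀ items : List (Char × Int),
    List.find? (fun p => p.1 == k') (items.filter (fun p => !(p.1 == k))) =
    List.find? (fun p => p.1 == k') items := by
  intro items
  induction items with
  | nil => rfl
  | cons p rest ih =>
    have hkk : (k == k') = false := beq_eq_false_iff_ne.mpr (fun he => h he.symm)
    by_cases h1 : p.1 = k
    · simp [List.filter_cons, h1, List.find?_cons, hkk, ih]
    · by_cases h2 : p.1 = k'
      · simp [h2, h]
      · simp [h1, h2, ih]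

theorem pvGet?_erase (d : PySem.Dict Char Int) (k k' : Char) :
    (d.erase k).get? k' = if k' = k then none else d.get? k' := by
  by_cases h : k' = k
  · subst h
    have : List.find? (fun p => p.1 == k') (d.items.filter (fun p => !(p.1 == k'))) = none := by
      apply List.find?_eq_none.mpr
      intro p hp
      simp only [List.mem_filter] at hp
      simpa using hp.2
    simp [PySem.Dict.erase, PySem.Dict.get?, this]
  · simp [PySem.Dict.erase, PySem.Dict.get?, pvFindFilter k k' h d.items, h]

theorem pvRep_counter (l : List Char) : pvRep (PySem.Dict.counter l) l := by
  intro c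
  have hD := PySem.Dict.getD_counter l c
  have hC := PySem.Dict.contains_eq_isSome_get? (PySem.Dict.counter l) c
  have hK : (PySem.Dict.counter l).contains c = true ↔ c ∈ (PySem.Dict.counter l).keys :=
    PySem.Dict.contains_iff_mem_keys _ _
  rw [PySem.Dict.keys_counter] at hK
  by_cases hm : c ∈ l
  · have : (PySem.Dict.counter l).get? c |>.isSome := by
      rw [← hC]; exact hK.mpr ((PySem.Set.mem_ofList _ _).mpr hm)
    rcases Option.isSome_iff_exists.mp this with ⟨v, hv⟩
    have : v = (l.count c : Int) := by
      have := PySem.Dict.getD_eq_get?_getD (PySem.Dict.counter l) c 0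
      rw [hv] at this; simpa [hD] using this.symm
    subst this
    have hpos : l.count c ≠ 0 := (List.count_pos_iff.mpr hm).ne' 
    simp [hv, hpos]
  · have : ¬ ((PySem.Dict.counter l).get? c |>.isSome) := by
      rw [← hC]; intro h; exact hm ((PySem.Set.mem_ofList _ _).mp (hK.mp h))
    have hz : l.count c = 0 := by simpa [List.count_eq_zero] using hm
    simp [hz, Option.not_isSome_iff_eq_none.mp this]

theorem pvRep_contains {d : PySem.Dict Char Int} {m : List Char} (h : pvRep d m) (c : Char) :
    d.contains c = decide (c ∈ m) := by
  rw [PySem.Dict.contains_eq_isSome_get?, h c]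
  by_cases hm : c ∈ m
  · have : m.count c ≠ 0 := (List.count_pos_iff.mpr hm).ne'
    simp [this, hm]
  · have : m.count c = 0 := by simpa [List.count_eq_zero] using hm
    simp [this, hm]

-- one step of A's loop preserves the representation
theorem pvRep_step {d : PySem.Dict Char Int} {m : List Char} (h : pvRep d m) {c : Char}
    (hc : c ∈ m) :
    pvRep (let d2 := d.modify c 0 (fun v => v - 1);
           if d2.getD c 0 = 0 then d2.erase c else d2) (m.erase c) := by
  intro x
  have hcount : m.count c ≠ 0 := (List.count_pos_iff.mpr hc).ne'
  have hgd : d.getD c 0 = (m.count c : Int) := by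
    simp [PySem.Dict.getD_eq_get?_getD, h c, hcount]
  have hmod : ∀ y : Char, (d.modify c 0 (fun v => v - 1)).get? y
      = if y = c then some ((m.count c : Int) - 1) else d.get? y := by
    intro y
    simp [PySem.Dict.modify, PySem.Dict.get?_insert, hgd]
  have hgd2 : (d.modify c 0 (fun v => v - 1)).getD c 0 = (m.count c : Int) - 1 := by
    simp [PySem.Dict.getD_eq_get?_getD, hmod c]
  by_cases h1 : m.count c = 1
  · have hz : (d.modify c 0 (fun v => v - 1)).getD c 0 = 0 := by rw [hgd2, h1]; simp
    simp only [hz, if_pos trivial]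
    rw [pvGet?_erase]
    by_cases hx : x = c
    · subst hx; simp [List.count_erase_self, h1]
    · rw [if_neg hx, hmod x, if_neg hx, h x, List.count_erase_of_ne hx]
  · have hz : ¬ (d.modify c 0 (fun v => v - 1)).getD c 0 = 0 := by rw [hgd2]; omega
    simp only [hz, if_neg (fun hf : False => hf)]
    rw [hmod x]
    by_cases hx : x = c
    · subst hx
      rw [if_pos rfl, List.count_erase_self]
      have hne : ¬ x ∈ m → False := fun hh => hh hc
      have h2 : m.count x - 1 ≠ 0 := by omega
      rw [if_neg h2]
      congr 1
      push_cast [Nat.cast_sub (Nat.one_le_iff_ne_zero.mpr hcount)]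
      ring
    · rw [if_neg hx, h x, List.count_erase_of_ne hx]

-- A's loop step, named for the proofs
def pvStepA : (Int × PySem.Dict Char Int) → Char → (Int × PySem.Dict Char Int) :=
  fun st c =>
    if st.2.contains c then
      let r := st.1 - 2
      let d := st.2.modify c 0 (fun v => v - 1)
      if d.getD c 0 = 0 then (r, d.erase c) else (r, d)
    else st

-- A's loop, abstractly: result drops by 2 per matched character
theorem pvFoldA : ∀ (l2 : List Char) (r : Int) (d : PySem.Dict Char Int) (m : List Char),
    pvRep d m → (l2.foldl pvStepA (r, d)).1 = r - 2 * pvMatched m l2 := by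
  intro l2
  induction l2 with
  | nil => intro r d m _; simp [pvMatched]
  | cons c t ih =>
    intro r d m h
    rw [List.foldl_cons]
    by_cases hc : c ∈ m
    · have hcon : d.contains c = true := by simp [pvRep_contains h, hc]
      have hst := pvRep_step h hc
      simp only at hst
      have hm' : pvMatched m (c :: t) = pvMatched (m.erase c) t + 1 := by
        simp [pvMatched, hc]
      by_cases hz : (d.modify c 0 (fun v => v - 1)).getD c 0 = 0
      · rw [if_pos hz] at hst
        have hstep : pvStepA (r, d) c = (r - 2, (d.modify c 0 (fun v => v - 1)).erase c) := by
          simp only [pvStepA, hcon, if_true]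
          rw [if_pos hz]
        rw [hstep, ih (r - 2) _ _ hst, hm']
        push_cast; ring
      · rw [if_neg hz] at hst
        have hstep : pvStepA (r, d) c = (r - 2, d.modify c 0 (fun v => v - 1)) := by
          simp only [pvStepA, hcon, if_true]
          rw [if_neg hz]
        rw [hstep, ih (r - 2) _ _ hst, hm']
        push_cast; ring
    · have hcon : d.contains c = false := by simp [pvRep_contains h, hc]
      have hstep : pvStepA (r, d) c = (r, d) := by simp [pvStepA, hcon]
      rw [hstep, ih r d m h]
      simp [pvMatched, hc]

-- sum-splitting over a map
theorem pvSum_map_add (S : List Char) (f g : Char → Int) :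
    (S.map (fun x => f x + g x)).sum = (S.map f).sum + (S.map g).sum := by
  induction S with
  | nil => simp
  | cons a t ih => simp [ih]; ring

theorem pvSum_indicator : ∀ (S : List Char) (c : Char), S.Nodup → c ∈ S →
    (S.map (fun ch => if c = ch then (1 : Int) else 0)).sum = 1 := by
  intro S
  induction S with
  | nil => intro c _ hc; cases hc
  | cons a t ih =>
    intro c hnd hc
    rcases List.mem_cons.mp hc with h | h
    · subst h
      have hz : ∀ ch ∈ t, (if c = ch then (1 : Int) else 0) = 0 := by
        intro ch hch
        have : c ≠ ch := fun he => (List.nodup_cons.mp hnd).1 (he ▸ hch)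
        simp [this]
      have : (t.map (fun ch => if c = ch then (1 : Int) else 0)).sum = 0 := by
        rw [List.map_congr_left hz]; simp
      simp [this]
    · have hne : c ≠ a := fun he => (List.nodup_cons.mp hnd).1 (he ▸ h)
      simp [hne, ih c (List.nodup_cons.mp hnd).2 h]

theorem pvSum_count (S : List Char) (hnd : S.Nodup) : ∀ (l : List Char),
    (∀ c ∈ l, c ∈ S) → (S.map (fun ch => (l.count ch : Int))).sum = l.length := by
  intro l
  induction l with
  | nil => intro _; simp
  | cons c t ih =>
    intro hsub
    have hterm : ∀ ch ∈ S, ((c :: t).count ch : Int)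
        = (t.count ch : Int) + (if c = ch then (1 : Int) else 0) := by
      intro ch _
      by_cases h : c = ch
      · subst h; rw [List.count_cons_self]; push_cast; simp
      · rw [List.count_cons_of_ne h]; simp [h]
    rw [List.map_congr_left hterm, pvSum_map_add,
        ih (fun x hx => hsub x (List.mem_cons_of_mem _ hx)),
        pvSum_indicator S c hnd (hsub c List.mem_cons_self)]
    push_cast [List.length_cons]; ring

theorem pvMatched_eq_sum_min : ∀ (l2 m S : List Char), S.Nodup →
    (∀ c ∈ m, c ∈ S) → (∀ c ∈ l2, c ∈ S) →
    (pvMatched m l2 : Int) = (S.map (fun ch => min (m.count ch : Int) (l2.count ch))).sum := by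
  intro l2
  induction l2 with
  | nil =>
    intro m S _ _ _
    have : ∀ ch ∈ S, min ((m.count ch : Int)) ((List.count ch ([] : List Char) : Int)) = 0 := by
      intro ch _; simp
    rw [List.map_congr_left this]
    simp [pvMatched]
  | cons c t ih =>
    intro m S hnd hm hl
    have hcS : c ∈ S := hl c List.mem_cons_self
    have htS : ∀ x ∈ t, x ∈ S := fun x hx => hl x (List.mem_cons_of_mem _ hx)
    by_cases hc : c ∈ m
    · have hpos : 1 ≤ m.count c := List.count_pos_iff.mpr hc
      have hterm : ∀ ch ∈ S, min ((m.count ch : Int)) (((c :: t).count ch : Int))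
          = min (((m.erase c).count ch : Int)) ((t.count ch : Int))
            + (if c = ch then (1 : Int) else 0) := by
        intro ch _
        by_cases h : c = ch
        · subst h
          rw [List.count_erase_self, List.count_cons_self]
          simp only [if_pos rfl]
          push_cast [Nat.cast_sub hpos]
          omega
        · rw [List.count_erase_of_ne (fun he => h he.symm), List.count_cons_of_ne h]
          simp [h]
      rw [List.map_congr_left hterm, pvSum_map_add, pvSum_indicator S c hnd hcS]
      have hmsub : ∀ x ∈ m.erase c, x ∈ S := fun x hx => hm x (List.mem_of_mem_erase hx)
      rw [show pvMatched m (c :: t) = pvMatched (m.erase c) t + 1 from by simp [pvMatched, hc],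
          ← ih (m.erase c) S hnd hmsub htS]
      push_cast; ring
    · have hz : m.count c = 0 := List.count_eq_zero.mpr hc
      have hterm : ∀ ch ∈ S, min ((m.count ch : Int)) (((c :: t).count ch : Int))
          = min ((m.count ch : Int)) ((t.count ch : Int)) := by
        intro ch _
        by_cases h : c = ch
        · subst h; simp [hz]; omega
        · rw [List.count_cons_of_ne h]
      rw [List.map_congr_left hterm, ← ih m S hnd hm htS]
      simp [pvMatched, hc]

theorem pvSum_map_mul (S : List Char) (k : Int) (f : Char → Int) :
    (S.map (fun x => k * f x)).sum = k * (S.map f).sum := by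
  induction S with
  | nil => simp
  | cons a t ih => rw [List.map_cons, List.sum_cons, ih, List.map_cons, List.sum_cons]; ring

-- the key arithmetic identity: sum of absolute differences over any Nodup cover of both strings
theorem pvAbs_split (S : List Char) (l1 l2 : List Char) (hnd : S.Nodup)
    (h1 : ∀ c ∈ l1, c ∈ S) (h2 : ∀ c ∈ l2, c ∈ S) :
    (S.map (fun ch => |(l1.count ch : Int) - (l2.count ch : Int)|)).sum
      = (l1.length : Int) + l2.length - 2 * pvMatched l1 l2 := by
  have hterm : ∀ ch ∈ S, |(l1.count ch : Int) - (l2.count ch : Int)|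
      = (l1.count ch : Int) + ((l2.count ch : Int)
          + (-2) * min ((l1.count ch : Int)) ((l2.count ch : Int))) := by
    intro ch _
    rcases le_total ((l1.count ch : Int)) ((l2.count ch : Int)) with h | h
    · rw [min_eq_left h, abs_of_nonpos (by omega)]; ring
    · rw [min_eq_right h, abs_of_nonneg (by omega)]; ring
  rw [List.map_congr_left hterm, pvSum_map_add, pvSum_map_add,
      pvSum_count S hnd l1 h1, pvSum_count S hnd l2 h2]
  have hmin := pvMatched_eq_sum_min l2 l1 S hnd h1 h2
  rw [pvSum_map_mul S (-2) (fun ch => min ((l1.count ch : Int)) ((l2.count ch : Int))), ← hmin]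
  ring

-- ===== VERDICT (by name: the statement is the Claim_ definition above) =====
theorem string_char_counts_difference_spec : Claim_equal_string_char_counts_difference := by
  intro s1 s2 _
  show string_char_counts_difference s1 s2 = string_char_counts_difference_alt s1 s2
  unfold string_char_counts_difference string_char_counts_difference_alt
  simp only [PySem.Dict.keys_counter]
  set S : List Char := PySem.Set.union (PySem.Set.ofList s1.toList) (PySem.Set.ofList s2.toList) with hS
  have hnd : S.Nodup := PySem.Set.nodup_union _ _ (PySem.Set.nodup_ofList _)
  have h1 : ∀ c ∈ s1.toList, c ∈ S := fun c hc => by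
    rw [hS]; exact (PySem.Set.mem_union _ _ _).mpr (Or.inl ((PySem.Set.mem_ofList _ _).mpr hc))
  have h2 : ∀ c ∈ s2.toList, c ∈ S := fun c hc => by
    rw [hS]; exact (PySem.Set.mem_union _ _ _).mpr (Or.inr ((PySem.Set.mem_ofList _ _).mpr hc))
  rw [show (fun (st : Int × PySem.Dict Char Int) c =>
      if st.2.contains c then
        let r := st.1 - 2
        let d := st.2.modify c 0 (fun v => v - 1)
        if d.getD c 0 = 0 then (r, d.erase c) else (r, d)
      else st) = pvStepA from rfl,
    pvFoldA s2.toList _ _ s1.toList (pvRep_counter s1.toList)]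
  have hmap : S.map (fun ch => |(PySem.Dict.counter s1.toList).getD ch 0
        - (PySem.Dict.counter s2.toList).getD ch 0|)
      = S.map (fun ch => |(s1.toList.count ch : Int) - (s2.toList.count ch : Int)|) := by
    apply List.map_congr_left
    intro ch _
    rw [PySem.Dict.getD_counter, PySem.Dict.getD_counter]
  rw [hmap, pvAbs_split S s1.toList s2.toList hnd h1 h2]
  simp [PySem.Str.len]
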